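-- pv_equiv track=rewrite | github.com/MapleEve/VoScript | app/providers/artifacts/default.py | _build_display_names
-- ===== SOURCE A (Python) =====
-- def _build_display_names(
--     speaker_labels: list[str],
--     speaker_map: dict[str, dict],
-- ) -> dict[str, str]:
--     labels_by_name: dict[str, list[str]] = {}
--
--     for speaker_label in speaker_labels:
--         match = speaker_map.get(speaker_label, {})
--         speaker_name = str(match.get("matched_name") or speaker_label)
--         labels_by_name.setdefault(speaker_name, []).append(speaker_label)
--
--     display_names: dict[str, str] = {}
--     for speaker_name, labels in labels_by_name.items():
--         for index, speaker_label in enumerate(labels, start=1):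
--             display_names[speaker_label] = (
--                 speaker_name if index == 1 else f"{speaker_name} ({index})"
--             )
--     return display_names
-- ===== SOURCE B (Python) =====
-- def _build_display_names(
--     speaker_labels: list[str],
--     speaker_map: dict[str, dict],
-- ) -> dict[str, str]:
--     def resolve(label):
--         return str(speaker_map.get(label, {}).get("matched_name") or label)
--
--     names: list[str] = []
--     for label in speaker_labels:
--         name = resolve(label)
--         if name not in names:
--             names.append(name)
--
--     display_names: dict[str, str] = {}
--     for name in names:
--         index = 0
--         for label in speaker_labels:
--             if resolve(label) == name:
--                 index += 1
--                 display_names[label] = name if index == 1 else f"{name} ({index})"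
--     return display_names
-- ===== Notes on version B (the rewrite author's own statement) =====
-- stated objective: alternative
-- what changed: B keeps no grouping dict of label lists: it collects the distinct resolved names in first-occurrence order and then, for each name, rescans speaker_labels with a running counter, numbering matches directly; it trades A's one-pass hash grouping for a rescan per distinct name.
import Mathlib
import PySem

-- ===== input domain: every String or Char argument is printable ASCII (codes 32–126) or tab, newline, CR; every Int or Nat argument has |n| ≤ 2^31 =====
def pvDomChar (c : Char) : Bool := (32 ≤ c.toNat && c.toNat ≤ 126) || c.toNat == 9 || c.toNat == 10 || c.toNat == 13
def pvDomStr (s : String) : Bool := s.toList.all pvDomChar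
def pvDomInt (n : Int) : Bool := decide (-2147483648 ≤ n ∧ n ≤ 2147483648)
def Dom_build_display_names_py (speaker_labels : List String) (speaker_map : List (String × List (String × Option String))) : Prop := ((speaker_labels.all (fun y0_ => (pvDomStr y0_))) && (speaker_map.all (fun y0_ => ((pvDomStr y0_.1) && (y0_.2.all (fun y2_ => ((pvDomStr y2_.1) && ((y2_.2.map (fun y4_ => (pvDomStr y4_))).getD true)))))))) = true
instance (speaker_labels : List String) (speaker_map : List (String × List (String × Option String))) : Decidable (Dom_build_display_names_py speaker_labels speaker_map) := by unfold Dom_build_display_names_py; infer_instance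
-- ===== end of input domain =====

-- B replaces A's hash-grouping of labels into lists by a direct rescan per distinct resolved
-- name with a running counter (alternative decomposition, same results, not claimed faster).


-- ===== PORT A =====
-- literal port of A: one pass grouping labels by resolved name (setdefault/append =
-- Dict.modify with default []), then a pass over the groups numbering each group's labels.
def build_display_names_py (speaker_labels : List String) (speaker_map : List (String × List (String × Option String))) : List (String × String) :=
  let smd : PySem.Dict String (List (String × Option String)) := PySem.Dict.mk speaker_map
  let labels_by_name : PySem.Dict String (List String) :=
    speaker_labels.foldl (fun acc speaker_label =>
      -- speaker_name = str(match.get("matched_name") or speaker_label): None and "" are falsy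
      let speaker_name :=
        match (PySem.Dict.mk (smd.getD speaker_label [])).get? "matched_name" with
        | some (some s) => if s = "" then speaker_label else s
        | _ => speaker_label
      acc.modify speaker_name [] (· ++ [speaker_label])) PySem.Dict.empty
  (labels_by_name.items.foldl (fun display_names p =>
      (p.2.foldl (fun st speaker_label =>
          (st.1.insert speaker_label
            (if st.2 + 1 = 1 then p.1 else p.1 ++ " (" ++ toString (st.2 + 1) ++ ")"),
           st.2 + 1))
        (display_names, (0 : Nat))).1)
    (PySem.Dict.empty : PySem.Dict String String)).items

-- ===== PORT B =====
-- str(match.get("matched_name") or label): the falsy values of an Optional[str] are None and ""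
def pvResolve (speaker_map : List (String × List (String × Option String))) (label : String) : String :=
  let s := (((PySem.Dict.mk ((PySem.Dict.mk speaker_map).getD label [])).get? "matched_name").join).getD ""
  if s = "" then label else s

def build_display_names_py_alt (speaker_labels : List String) (speaker_map : List (String × List (String × Option String))) : List (String × String) :=
  let names : List String :=
    speaker_labels.foldl (fun ns label =>
      if pvResolve speaker_map label ∈ ns then ns else ns ++ [pvResolve speaker_map label]) []
  (names.foldl (fun display_names name =>
      (speaker_labels.foldl (fun st label =>
          if pvResolve speaker_map label == name then
            (st.1.insert label
              (if st.2 + 1 = 1 then name else name ++ " (" ++ toString (st.2 + 1) ++ ")"),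
             st.2 + 1)
          else st)
        (display_names, (0 : Nat))).1)
    (PySem.Dict.empty : PySem.Dict String String)).items

-- ===== PRECONDITION & SPEC =====
def Spec_build_display_names_py (speaker_labels : List String) (speaker_map : List (String × List (String × Option String))) (out : List (String × String)) : Prop := out = build_display_names_py_alt speaker_labels speaker_map
instance (speaker_labels : List String) (speaker_map : List (String × List (String × Option String))) (out : List (String × String)) : Decidable (Spec_build_display_names_py speaker_labels speaker_map out) := by unfold Spec_build_display_names_py; infer_instance

-- ===== CLAIM (what is proved, stated in full; the proofs are below) =====
def Claim_equal_build_display_names_py : Prop := ∀ (speaker_labels : List String) (speaker_map : List (String × List (String × Option String))), Dom_build_display_names_py speaker_labels speaker_map → Spec_build_display_names_py speaker_labels speaker_map (build_display_names_py speaker_labels speaker_map)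

-- ===== LEMMAS AND PROOFS =====

-- A's inline name resolution agrees with B's helper
theorem resolve_eq (sm : List (String × List (String × Option String))) (label : String) :
    (match (PySem.Dict.mk ((PySem.Dict.mk sm).getD label [])).get? "matched_name" with
     | some (some s) => if s = "" then label else s
     | _ => label) = pvResolve sm label := by
  unfold pvResolve
  cases h : (PySem.Dict.mk ((PySem.Dict.mk sm).getD label [])).get? "matched_name" with
  | none => simp
  | some o => cases o <;> simp

theorem keys_groupA (sl : List String) (sm : List (String × List (String × Option String))) :
    (sl.foldl (fun (acc : PySem.Dict String (List String)) x => acc.modify (pvResolve sm x) [] (· ++ [x])) PySem.Dict.empty).keys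
    = PySem.Set.ofList (sl.map (pvResolve sm)) := by
  rw [PySem.Dict.keys_foldl_modify_key]
  simp [PySem.Dict.keys_empty, PySem.Set.update_nil_left]

theorem nodup_keys_groupA (sl : List String) (sm : List (String × List (String × Option String))) :
    (sl.foldl (fun (acc : PySem.Dict String (List String)) x => acc.modify (pvResolve sm x) [] (· ++ [x])) PySem.Dict.empty).keys.Nodup := by
  exact PySem.Dict.nodup_keys_foldl_modify_key sl (pvResolve sm) [] _ PySem.Dict.empty (by simp [PySem.Dict.keys_empty])

theorem getD_groupA (sl : List String) (sm : List (String × List (String × Option String))) (c : String) :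
    (sl.foldl (fun (acc : PySem.Dict String (List String)) x => acc.modify (pvResolve sm x) [] (· ++ [x])) PySem.Dict.empty).getD c []
    = sl.filter (fun x => pvResolve sm x == c) := by
  have h : (sl.foldl (fun (acc : PySem.Dict String (List String)) x => acc.modify (pvResolve sm x) [] (· ++ [x])) PySem.Dict.empty)
      = ((sl.map (fun x => (pvResolve sm x, x))).foldl (fun acc p => acc.modify p.1 [] (· ++ [p.2])) PySem.Dict.empty) := by
    rw [List.foldl_map]
  rw [h, PySem.Dict.getD_foldl_modify_append]
  simp [PySem.Dict.getD_empty, List.filter_map, Function.comp_def]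

-- B's name-collecting loop builds exactly the distinct resolved names, in order.
theorem namesB_eq (sl : List String) (sm : List (String × List (String × Option String))) :
    (sl.foldl (fun (ns : List String) label =>
        if pvResolve sm label ∈ ns then ns else ns ++ [pvResolve sm label]) [])
    = PySem.Set.ofList (sl.map (pvResolve sm)) := by
  have h : (sl.foldl (fun (ns : List String) label =>
        if pvResolve sm label ∈ ns then ns else ns ++ [pvResolve sm label]) [])
      = sl.foldl (fun ns label => PySem.Set.add ns (pvResolve sm label)) [] := by
    have hf : (fun (ns : List String) label =>
        if pvResolve sm label ∈ ns then ns else ns ++ [pvResolve sm label])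
        = fun ns label => PySem.Set.add ns (pvResolve sm label) := by
      funext ns l; rw [PySem.Set.add_eq_ite]
    rw [hf]
  rw [h, ← PySem.Set.update_map_eq_foldl_add, PySem.Set.update_nil_left]

-- per-name emission: A's fold over the group list = B's guarded fold over all labels
theorem emit_eq (sl : List String) (sm : List (String × List (String × Option String)))
    (name : String) (dn : PySem.Dict String String) :
    ((sl.filter (fun x => pvResolve sm x == name)).foldl (fun st speaker_label =>
        (st.1.insert speaker_label
          (if st.2 + 1 = 1 then name else name ++ " (" ++ toString (st.2 + 1) ++ ")"),
         st.2 + 1)) (dn, (0 : Nat)))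
    = sl.foldl (fun st label =>
        if pvResolve sm label == name then
          (st.1.insert label
            (if st.2 + 1 = 1 then name else name ++ " (" ++ toString (st.2 + 1) ++ ")"),
           st.2 + 1)
        else st) (dn, (0 : Nat)) := by
  exact List.foldl_filter ..

-- ===== VERDICT (by name: the statement is the Claim_ definition above) =====
theorem build_display_names_py_spec : Claim_equal_build_display_names_py := by
  intro sl sm _
  show build_display_names_py sl sm = build_display_names_py_alt sl sm
  have hfn : (fun (acc : PySem.Dict String (List String)) x =>
      acc.modify (match (PySem.Dict.mk ((PySem.Dict.mk sm).getD x [])).get? "matched_name" with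
        | some (some s) => if s = "" then x else s
        | _ => x) [] (· ++ [x]))
      = fun acc x => acc.modify (pvResolve sm x) [] (· ++ [x]) := by
    funext acc x; rw [resolve_eq]
  have hA : build_display_names_py sl sm =
      ((sl.foldl (fun (acc : PySem.Dict String (List String)) x =>
          acc.modify (pvResolve sm x) [] (· ++ [x])) PySem.Dict.empty).items.foldl
        (fun dn p => (p.2.foldl (fun st l =>
            (st.1.insert l (if st.2 + 1 = 1 then p.1 else p.1 ++ " (" ++ toString (st.2 + 1) ++ ")"),
             st.2 + 1)) (dn, (0 : Nat))).1)
        (PySem.Dict.empty : PySem.Dict String String)).items := by rw [← hfn]; rfl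
  have hB : build_display_names_py_alt sl sm =
      (((sl.foldl (fun (ns : List String) l =>
          if pvResolve sm l ∈ ns then ns else ns ++ [pvResolve sm l]) []).foldl
        (fun dn name => (sl.foldl (fun st l =>
            if pvResolve sm l == name then
              (st.1.insert l (if st.2 + 1 = 1 then name else name ++ " (" ++ toString (st.2 + 1) ++ ")"),
               st.2 + 1)
            else st) (dn, (0 : Nat))).1)
        (PySem.Dict.empty : PySem.Dict String String))).items := rfl
  rw [hA, hB, namesB_eq]
  have hitems : (sl.foldl (fun (acc : PySem.Dict String (List String)) x =>
        acc.modify (pvResolve sm x) [] (· ++ [x])) PySem.Dict.empty).items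
      = (PySem.Set.ofList (sl.map (pvResolve sm))).map
        (fun k => (k, sl.filter (fun x => pvResolve sm x == k))) := by
    rw [PySem.Dict.items_eq_map_keys _ (nodup_keys_groupA sl sm) [], keys_groupA]
    exact List.map_congr_left (fun k _ => by rw [getD_groupA])
  rw [hitems, List.foldl_map]
  congr 1
  congr 1
  funext dn k
  show (List.foldl (fun st l =>
      (st.1.insert l (if st.2 + 1 = 1 then k else k ++ " (" ++ toString (st.2 + 1) ++ ")"),
       st.2 + 1)) (dn, (0 : Nat)) (sl.filter (fun x => pvResolve sm x == k))).1
    = (sl.foldl (fun st l =>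
        if pvResolve sm l == k then
          (st.1.insert l (if st.2 + 1 = 1 then k else k ++ " (" ++ toString (st.2 + 1) ++ ")"),
           st.2 + 1)
        else st) (dn, (0 : Nat))).1
  rw [emit_eq]
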